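-- pv_equiv track=rewrite | github.com/siyuanliii/masa | masa/datasets/evaluation/bdd_teta_metric.py | compute_global_track_id
-- ===== SOURCE A (Python) =====
-- def compute_global_track_id(all_seq_pred):
--
--     max_track_id = 0
--
--     for video_id, seq_pred in all_seq_pred.items():
--         track_ids = []
--
--         for frame_pred in seq_pred:
--             track_ids.append(frame_pred["track_id"])
--             frame_pred["track_id"] += max_track_id
--         track_ids = list(set(track_ids))
--
--         if track_ids:
--             max_track_id += max(track_ids) + 1
--
--     return all_seq_pred
-- ===== SOURCE B (Python) =====
-- def compute_global_track_id(all_seq_pred):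
--     # Two passes: first compute each video's cumulative offset (prefix sums of
--     # per-video contributions), then apply the offsets; mutates frames in place like A.
--     offsets = []
--     off = 0
--     for video_id, seq_pred in all_seq_pred.items():
--         offsets.append(off)
--         if seq_pred:
--             off += max(frame_pred["track_id"] for frame_pred in seq_pred) + 1
--     for (video_id, seq_pred), off in zip(all_seq_pred.items(), offsets):
--         for frame_pred in seq_pred:
--             frame_pred["track_id"] += off
--     return all_seq_pred
-- ===== Notes on version B (the rewrite author's own statement) =====
-- stated objective: alternative
-- what changed: Replaces A's single interleaved loop (which mutates frames while accumulating the running max) by two separate passes: a first pass building a prefix-sum table of per-video offsets from the unmodified data, and a second pass applying each video's offset to its frames.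
import Mathlib
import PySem

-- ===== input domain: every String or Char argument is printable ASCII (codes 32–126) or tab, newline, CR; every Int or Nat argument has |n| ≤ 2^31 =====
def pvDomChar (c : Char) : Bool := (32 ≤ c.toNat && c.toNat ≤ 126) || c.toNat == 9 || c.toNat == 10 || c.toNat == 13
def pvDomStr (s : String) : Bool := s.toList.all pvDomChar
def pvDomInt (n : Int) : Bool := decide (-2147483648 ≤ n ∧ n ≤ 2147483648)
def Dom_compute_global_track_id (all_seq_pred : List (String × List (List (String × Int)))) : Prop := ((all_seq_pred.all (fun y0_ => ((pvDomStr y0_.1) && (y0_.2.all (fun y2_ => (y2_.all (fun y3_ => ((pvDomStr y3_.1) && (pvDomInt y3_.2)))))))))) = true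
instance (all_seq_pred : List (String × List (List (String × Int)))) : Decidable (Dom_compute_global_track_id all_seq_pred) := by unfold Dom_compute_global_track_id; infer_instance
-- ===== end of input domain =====

-- B separates the offset computation (a prefix-sum table built in a first pass over
-- the unmodified data) from the mutation pass; in Python both A and B mutate the
-- frame dicts in place, and the equivalence proved here is about the returned value.

-- frame_pred["track_id"] : first match in the association list (0 is unreachable under Pre_)
def pvGetId : List (String × Int) → Int
  | [] => 0
  | (k, v) :: r => if k = "track_id" then v else pvGetId r

-- frame_pred["track_id"] += off : update the first matching key in place
def pvAddId (off : Int) : List (String × Int) → List (String × Int)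
  | [] => []
  | (k, v) :: r => if k = "track_id" then (k, v + off) :: r else (k, v) :: pvAddId off r

-- ===== PORT A =====
def pvGoA : Int → List (String × List (List (String × Int))) → List (String × List (List (String × Int)))
  | _, [] => []
  | m, (vid, seq) :: rest =>
      -- inner loop: track_ids.append(frame_pred["track_id"]); frame_pred["track_id"] += m
      let st := seq.foldl
        (fun (st : List Int × List (List (String × Int))) f =>
          (st.1 ++ [pvGetId f], st.2 ++ [pvAddId m f])) ([], [])
      -- track_ids = list(set(track_ids)); if track_ids: max_track_id += max(track_ids) + 1
      let tids : PySem.Set Int := PySem.Set.ofList st.1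
      let m' := match PySem.List.max? tids (fun x => x) with
        | some mx => m + mx + 1
        | none => m
      (vid, st.2) :: pvGoA m' rest

def compute_global_track_id (all_seq_pred : List (String × List (List (String × Int)))) : List (String × List (List (String × Int))) :=
  pvGoA 0 all_seq_pred

-- ===== PORT B =====
-- first pass of Source B: offsets.append(off); if seq_pred: off += max(...) + 1
def pvOffsets : Int → List (String × List (List (String × Int))) → List Int
  | _, [] => []
  | off, (_, seq) :: rest =>
      off :: pvOffsets (match PySem.List.max? (seq.map pvGetId) (fun x => x) with
                        | some mx => off + mx + 1
                        | none => off) rest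

def compute_global_track_id_alt (all_seq_pred : List (String × List (List (String × Int)))) : List (String × List (List (String × Int))) :=
  -- second pass of Source B: for (vid, seq), off in zip(items, offsets): frame["track_id"] += off
  (all_seq_pred.zip (pvOffsets 0 all_seq_pred)).map
    (fun p => (p.1.1, p.1.2.map (pvAddId p.2)))

-- ===== PRECONDITION & SPEC =====
-- Pre_ excludes exactly the inputs where some frame dict lacks the key "track_id",
-- on which the Python A (and B) raise KeyError.
def Pre_compute_global_track_id (all_seq_pred : List (String × List (List (String × Int)))) : Prop :=
  (all_seq_pred.all (fun p => p.2.all (fun f => f.any (fun kv => kv.1 == "track_id")))) = true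
instance (all_seq_pred : List (String × List (List (String × Int)))) : Decidable (Pre_compute_global_track_id all_seq_pred) := by unfold Pre_compute_global_track_id; infer_instance

def pvWitness_compute_global_track_id : (List (String × List (List (String × Int)))) :=
  [("v1", [[("track_id", 3), ("score", 1)], [("track_id", 0)]]), ("v2", []), ("v3", [[("track_id", 2)]])]

def Spec_compute_global_track_id (all_seq_pred : List (String × List (List (String × Int)))) (out : List (String × List (List (String × Int)))) : Prop := out = compute_global_track_id_alt all_seq_pred
instance (all_seq_pred : List (String × List (List (String × Int)))) (out : List (String × List (List (String × Int)))) : Decidable (Spec_compute_global_track_id all_seq_pred out) := by unfold Spec_compute_global_track_id; infer_instance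

-- ===== CLAIM (what is proved, stated in full; the proofs are below) =====
def Claim_equal_compute_global_track_id : Prop := ∀ (all_seq_pred : List (String × List (List (String × Int)))), Dom_compute_global_track_id all_seq_pred → Pre_compute_global_track_id all_seq_pred → Spec_compute_global_track_id all_seq_pred (compute_global_track_id all_seq_pred)

-- ===== LEMMAS AND PROOFS =====

-- the interleaved inner loop of A is two maps over the unchanged frame list
theorem pvFoldl_pair (m : Int) (seq : List (List (String × Int)))
    (a : List Int) (b : List (List (String × Int))) :
    seq.foldl (fun (st : List Int × List (List (String × Int))) f =>
        (st.1 ++ [pvGetId f], st.2 ++ [pvAddId m f])) (a, b)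
      = (a ++ seq.map pvGetId, b ++ seq.map (pvAddId m)) := by
  induction seq generalizing a b with
  | nil => simp
  | cons f t ih => simp [List.foldl, ih]

-- max over list(set(l)) is max over l (value-wise; ids are ints, no key)
theorem pvMax?_ofList (l : List Int) :
    PySem.List.max? (PySem.Set.ofList l) (fun x => x) = PySem.List.max? l (fun x => x) := by
  cases hl : PySem.List.max? l (fun x => x) with
  | none =>
      rw [PySem.List.max?_eq_none_iff] at hl
      subst hl; rfl
  | some m =>
      have hm : m ∈ l := PySem.List.max?_mem hl
      cases hs : PySem.List.max? (PySem.Set.ofList l) (fun x => x) with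
      | none =>
          rw [PySem.List.max?_eq_none_iff] at hs
          have hmem : m ∈ PySem.Set.ofList l := (PySem.Set.mem_ofList l m).mpr hm
          rw [hs] at hmem; cases hmem
      | some m' =>
          have hm' : m' ∈ l := (PySem.Set.mem_ofList l m').mp (PySem.List.max?_mem hs)
          have h1 := PySem.List.max?_isMax hs m ((PySem.Set.mem_ofList l m).mpr hm)
          have h2 := PySem.List.max?_isMax hl m' hm'
          exact congrArg some (le_antisymm h2 h1)

-- A's fold with running offset m equals B's zip-with-offsets starting at m
theorem pvGoA_eq (l : List (String × List (List (String × Int)))) (m : Int) :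
    pvGoA m l = (l.zip (pvOffsets m l)).map (fun p => (p.1.1, p.1.2.map (pvAddId p.2))) := by
  induction l generalizing m with
  | nil => rfl
  | cons hd t ih =>
      obtain ⟨vid, seq⟩ := hd
      rw [pvGoA, pvOffsets]
      simp only [pvFoldl_pair, List.nil_append, pvMax?_ofList, List.zip_cons_cons, List.map_cons]
      rw [ih]

-- ===== VERDICT (by name: the statement is the Claim_ definition above) =====
theorem compute_global_track_id_spec : Claim_equal_compute_global_track_id := by
  intro l _ _
  unfold Spec_compute_global_track_id compute_global_track_id compute_global_track_id_alt
  exact pvGoA_eq l 0
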